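-- pv_equiv track=rewrite | github.com/Smart-Data-Engines/low-cost-and-low-latency-orderbook-dbengine | python/orderbook_engine/__init__.py | _parse_tcp_response
-- ===== SOURCE A (Python) =====
-- def _parse_tcp_response(raw: str):
--     """
--     Parse a TCP wire-format response.
--
--     Wire format:
--       Error:   "ERR <message>\n"
--       PONG:    "PONG\n"
--       OK body: "OK\n<header_tsv>\n<row1_tsv>\n...\n\n"
--       OK bare: "OK\n\n"
--
--     Returns (is_error, error_msg, header_cols, data_rows)
--     """
--     if raw.startswith("ERR "):
--         msg = raw[4:].rstrip("\n")
--         return True, msg, [], []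
--
--     if raw.startswith("PONG"):
--         return False, "", [], []
--
--     if raw.startswith("OK\n"):
--         body = raw[3:]
--         lines = body.split("\n")
--         # Find header
--         idx = 0
--         while idx < len(lines) and not lines[idx]:
--             idx += 1
--         if idx >= len(lines):
--             return False, "", [], []
--         header = lines[idx].split("\t")
--         idx += 1
--         rows = []
--         while idx < len(lines) and lines[idx]:
--             rows.append(lines[idx].split("\t"))
--             idx += 1
--         return False, "", header, rows
--
--     # bare OK
--     if raw.strip() == "OK":
--         return False, "", [], []
--
--     return True, f"unexpected response: {raw[:80]}", [], []
-- ===== SOURCE B (Python) =====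
-- def _parse_tcp_response(raw: str):
--     """Parse a TCP wire-format response (segment-extract-then-split version)."""
--     if raw.startswith("ERR "):
--         return True, raw[4:].rstrip("\n"), [], []
--
--     if raw.startswith("PONG"):
--         return False, "", [], []
--
--     if raw.startswith("OK\n"):
--         stripped = raw[3:].lstrip("\n")
--         if not stripped:
--             return False, "", [], []
--         block = stripped.split("\n\n", 1)[0]
--         parts = block.split("\n")
--         return False, "", parts[0].split("\t"), [p.split("\t") for p in parts[1:] if p]
--
--     if raw.strip() == "OK":
--         return False, "", [], []
--
--     return True, f"unexpected response: {raw[:80]}", [], []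
-- ===== Notes on version B (the rewrite author's own statement) =====
-- stated objective: simpler
-- what changed: A's OK branch splits the body into a list of lines and walks it with two index-stepping while loops (skip leading empty lines, then collect rows until an empty line); B instead strips leading newlines, extracts the first blank-line-delimited paragraph with a single maxsplit-1 split on the double-newline separator, and splits that block once into header and rows.
import Mathlib
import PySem

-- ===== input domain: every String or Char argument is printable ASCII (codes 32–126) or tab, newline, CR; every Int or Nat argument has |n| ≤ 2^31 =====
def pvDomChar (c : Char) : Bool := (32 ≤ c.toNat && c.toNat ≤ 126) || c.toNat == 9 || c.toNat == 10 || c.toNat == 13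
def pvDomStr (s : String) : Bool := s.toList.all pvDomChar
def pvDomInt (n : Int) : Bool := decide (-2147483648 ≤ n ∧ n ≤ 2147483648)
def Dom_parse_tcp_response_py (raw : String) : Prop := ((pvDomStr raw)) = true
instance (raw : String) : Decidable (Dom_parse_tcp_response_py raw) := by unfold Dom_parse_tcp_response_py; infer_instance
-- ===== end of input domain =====

-- B replaces A's two index-stepping while loops over the split lines by extracting the
-- first paragraph (lstrip('\n') + split('\n\n', 1)) and splitting it once; objective: simpler.

-- ===== PORT A =====

-- hand port of s.rstrip("\n") (strip set is exactly {'\n'}): exact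
def pyRstripNl (s : String) : String :=
  String.ofList ((s.toList.reverse.dropWhile (fun c => c == '\n')).reverse)

-- port of s.split("\n") (sep nonempty, so Chars.splitOn applies)
def pySplitNl (s : String) : List String :=
  (PySem.Chars.splitOn s.toList ['\n']).map String.ofList

-- port of s.split("\t")
def pySplitTab (s : String) : List String :=
  (PySem.Chars.splitOn s.toList ['\t']).map String.ofList

-- A's first while loop: advance idx past empty lines (returns the suffix from idx on)
def skipEmptyA : List String → List String
  | [] => []
  | l :: ls => if l = "" then skipEmptyA ls else l :: ls

-- A's second while loop: collect split rows while lines[idx] is nonempty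
def rowsA : List String → List (List String)
  | [] => []
  | l :: ls => if l = "" then [] else pySplitTab l :: rowsA ls

def parse_tcp_response_py (raw : String) : Bool × String × List String × List (List String) :=
  if PySem.Str.startswith raw "ERR " then
    (true, pyRstripNl (PySem.Str.slice raw (some 4) none), [], [])
  else if PySem.Str.startswith raw "PONG" then
    (false, "", [], [])
  else if PySem.Str.startswith raw "OK\n" then
    let body := PySem.Str.slice raw (some 3) none
    let lines := pySplitNl body
    match skipEmptyA lines with
    | [] => (false, "", [], [])
    | h :: rest => (false, "", pySplitTab h, rowsA rest)
  else if PySem.Str.strip raw = "OK" then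
    (false, "", [], [])
  else
    (true, "unexpected response: " ++ PySem.Str.slice raw none (some 80), [], [])

-- ===== PORT B =====

-- hand port of s.lstrip("\n") (strip set is exactly {'\n'}): exact
def pyLstripNl (s : String) : String :=
  String.ofList (s.toList.dropWhile (fun c => c == '\n'))

def parse_tcp_response_py_alt (raw : String) : Bool × String × List String × List (List String) :=
  if PySem.Str.startswith raw "ERR " then
    (true, pyRstripNl (PySem.Str.slice raw (some 4) none), [], [])
  else if PySem.Str.startswith raw "PONG" then
    (false, "", [], [])
  else if PySem.Str.startswith raw "OK\n" then
    let stripped := pyLstripNl (PySem.Str.slice raw (some 3) none)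
    if stripped = "" then (false, "", [], [])
    else
      -- stripped.split("\n\n", 1)[0]: split of a nonempty sep never returns [], so [0] is headD
      let block := ((PySem.Chars.splitOnMax stripped.toList ['\n', '\n'] 1).map String.ofList).headD ""
      let parts := pySplitNl block
      (false, "", pySplitTab (parts.headD ""),
        ((parts.drop 1).filter (fun p => p ≠ "")).map (fun p => pySplitTab p))
  else if PySem.Str.strip raw = "OK" then
    (false, "", [], [])
  else
    (true, "unexpected response: " ++ PySem.Str.slice raw none (some 80), [], [])

-- ===== PRECONDITION & SPEC =====
def Spec_parse_tcp_response_py (raw : String) (out : Bool × String × List String × List (List String)) : Prop := out = parse_tcp_response_py_alt raw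
instance (raw : String) (out : Bool × String × List String × List (List String)) : Decidable (Spec_parse_tcp_response_py raw out) := by unfold Spec_parse_tcp_response_py; infer_instance

-- ===== CLAIM (what is proved, stated in full; the proofs are below) =====
def Claim_equal_parse_tcp_response_py : Prop := ∀ (raw : String), Dom_parse_tcp_response_py raw → Spec_parse_tcp_response_py raw (parse_tcp_response_py raw)

-- ===== LEMMAS AND PROOFS =====

-- simple recursive characterisation of split on a single-character separator
def splitC (a : Char) : List Char → List (List Char)
  | [] => [[]]
  | c :: r => if c = a then [] :: splitC a r else (splitC a r).modifyHead (c :: ·)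

-- simple recursive characterisation of split("\n\n", 1)
def split2 : List Char → List (List Char)
  | [] => [[]]
  | c :: r =>
    if (['\n', '\n'] : List Char).isPrefixOf (c :: r) then [[], r.drop 1]
    else (split2 r).modifyHead (c :: ·)

-- char-level mirror of skipEmptyA
def skipE : List (List Char) → List (List Char)
  | [] => []
  | l :: ls => if l = [] then skipE ls else l :: ls

theorem splitC_ne_nil (a : Char) (l : List Char) : splitC a l ≠ [] := by
  induction l with
  | nil => simp [splitC]
  | cons c r ih =>
    obtain ⟨x, t, hx⟩ := List.exists_cons_of_ne_nil ih
    simp only [splitC, hx]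
    split_ifs <;> simp [List.modifyHead]

theorem split2_ne_nil (l : List Char) : split2 l ≠ [] := by
  induction l with
  | nil => simp [split2]
  | cons c r ih =>
    obtain ⟨x, t, hx⟩ := List.exists_cons_of_ne_nil ih
    simp only [split2, hx]
    split_ifs <;> simp [List.modifyHead]

theorem go1 (a : Char) (l : List Char) : ∀ (fuel : Nat), l.length ≤ fuel → ∀ (cur : List Char) (acc : List (List Char)),
    PySem.Chars.splitOn.go [a] fuel l cur acc
      = acc.reverse ++ (splitC a l).modifyHead (cur.reverse ++ ·) := by
  induction l with
  | nil =>
    intro fuel _ cur acc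
    cases fuel <;> simp [PySem.Chars.splitOn.go, splitC, List.modifyHead]
  | cons c r ih =>
    intro fuel h cur acc
    obtain ⟨f, rfl⟩ : ∃ f, fuel = f + 1 := ⟨fuel - 1, by simp at h; omega⟩
    rw [PySem.Chars.splitOn.go]
    by_cases hc : c = a
    · subst hc
      simp only [List.isPrefixOf, BEq.rfl, Bool.true_and, if_true,
        List.length_cons, List.drop_succ_cons, List.drop_zero, List.length_nil]
      rw [ih f (by simp at h; omega)]
      obtain ⟨x, t, hx⟩ := List.exists_cons_of_ne_nil (splitC_ne_nil c r)
      simp [splitC, hx, List.modifyHead]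
    · have hpre : ([a].isPrefixOf (c :: r)) = false := by
        simp [List.isPrefixOf]
        exact fun hh => (hc hh.symm).elim
      rw [hpre]
      simp only [Bool.false_eq_true, if_false]
      rw [ih f (by simp at h; omega)]
      obtain ⟨x, t, hx⟩ := List.exists_cons_of_ne_nil (splitC_ne_nil a r)
      have : splitC a (c :: r) = (splitC a r).modifyHead (c :: ·) := by
        simp [splitC, hc]
      simp [this, hx, List.modifyHead]

theorem splitOn_single (a : Char) (l : List Char) : PySem.Chars.splitOn l [a] = splitC a l := by
  rw [PySem.Chars.splitOn, go1 a l (l.length + 1) (Nat.le_succ _) [] []]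
  obtain ⟨x, t, hx⟩ := List.exists_cons_of_ne_nil (splitC_ne_nil a l)
  simp [hx, List.modifyHead]

theorem goMax0 (sep : List Char) (fuel : Nat) (l cur : List Char) (acc : List (List Char)) :
    PySem.Chars.splitOnMax.go sep fuel 0 l cur acc = acc.reverse ++ [cur.reverse ++ l] := by
  cases fuel with
  | zero => simp [PySem.Chars.splitOnMax.go]
  | succ f => cases l <;> simp [PySem.Chars.splitOnMax.go]

theorem goMax1 (l : List Char) : ∀ (fuel : Nat), l.length ≤ fuel → ∀ (cur : List Char) (acc : List (List Char)),
    PySem.Chars.splitOnMax.go ['\n', '\n'] fuel 1 l cur acc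
      = acc.reverse ++ (split2 l).modifyHead (cur.reverse ++ ·) := by
  induction l with
  | nil =>
    intro fuel _ cur acc
    cases fuel <;> simp [PySem.Chars.splitOnMax.go, split2, List.modifyHead]
  | cons c r ih =>
    intro fuel h cur acc
    obtain ⟨f, rfl⟩ : ∃ f, fuel = f + 1 := ⟨fuel - 1, by simp at h; omega⟩
    rw [PySem.Chars.splitOnMax.go]
    simp only [Nat.one_ne_zero, if_false]
    by_cases hp : (['\n', '\n'] : List Char).isPrefixOf (c :: r) = true
    · rw [hp]
      simp only [if_true]
      have : split2 (c :: r) = [[], r.drop 1] := by simp [split2, hp]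
      rw [goMax0]
      simp [this, List.modifyHead]
    · rw [Bool.not_eq_true] at hp
      rw [hp]
      simp only [Bool.false_eq_true, if_false]
      rw [ih f (by simp at h; omega)]
      obtain ⟨x, t, hx⟩ := List.exists_cons_of_ne_nil (split2_ne_nil r)
      have : split2 (c :: r) = (split2 r).modifyHead (c :: ·) := by
        simp [split2, hp]
      simp [this, hx, List.modifyHead]

theorem splitOnMax_two (l : List Char) : PySem.Chars.splitOnMax l ['\n', '\n'] 1 = split2 l := by
  rw [PySem.Chars.splitOnMax]
  simp only [show ¬((1 : Int) < 0) by norm_num, if_false]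
  rw [show ((1 : Int)).toNat = 1 from rfl, goMax1 l (l.length + 1) (Nat.le_succ _) [] []]
  obtain ⟨x, t, hx⟩ := List.exists_cons_of_ne_nil (split2_ne_nil l)
  simp [hx, List.modifyHead]

theorem skipE_splitC (cs : List Char) :
    skipE (splitC '\n' cs)
      = if cs.dropWhile (fun c => c == '\n') = [] then []
        else splitC '\n' (cs.dropWhile (fun c => c == '\n')) := by
  induction cs with
  | nil => simp [splitC, skipE]
  | cons c r ih =>
    by_cases hc : c = '\n'
    · subst hc
      simp only [splitC, if_true, List.dropWhile]
      simpa [skipE, List.dropWhile] using ih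
    · obtain ⟨x, t, hx⟩ := List.exists_cons_of_ne_nil (splitC_ne_nil '\n' r)
      have h2 : splitC '\n' (c :: r) = (c :: x) :: t := by simp [splitC, hc, hx, List.modifyHead]
      have h3 : (c :: r).dropWhile (fun c => c == '\n') = c :: r := by
        rw [List.dropWhile_cons_of_neg]
        simp [hc]
      simp [h2, h3, skipE, splitC, hc, hx, List.modifyHead]

theorem split2_headD_cons (c : Char) (r : List Char)
    (h : ¬ ((['\n', '\n'] : List Char).isPrefixOf (c :: r) = true)) :
    (split2 (c :: r)).headD [] = c :: (split2 r).headD [] := by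
  rw [Bool.not_eq_true] at h
  obtain ⟨x, t, hx⟩ := List.exists_cons_of_ne_nil (split2_ne_nil r)
  simp [split2, h, hx, List.modifyHead]

-- the heart: B's paragraph-block split agrees with A's scan of the line list
theorem blockG (l : List Char) :
    (splitC '\n' ((split2 l).headD [])).headD [] = (splitC '\n' l).headD []
    ∧ ((splitC '\n' ((split2 l).headD [])).drop 1).filter (fun p => p ≠ [])
        = ((splitC '\n' l).drop 1).takeWhile (fun p => p ≠ []) := by
  induction l using split2.induct with
  | case1 => simp [split2, splitC]
  | case2 c r hp =>
    -- l = c :: r with "\n\n" a prefix: c = '\n' and r starts with '\n'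
    obtain ⟨hc, r', hr⟩ : c = '\n' ∧ ∃ r', r = '\n' :: r' := by
      cases r with
      | nil => simp [List.isPrefixOf] at hp
      | cons d r' =>
        simp [List.isPrefixOf] at hp
        exact ⟨hp.1.symm, r', by rw [← hp.2]⟩
    subst hc; subst hr
    have hb : split2 ('\n' :: '\n' :: r') = [[], r'.drop 0] := by
      simp [split2, hp]
    constructor
    · simp [hb, splitC]
    · simp [hb, splitC]
  | case3 c r hp ih =>
    have hhead := split2_headD_cons c r hp
    by_cases hc : c = '\n'
    · -- c = '\n', r does not start with '\n'
      subst hc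
      refine ⟨?_, ?_⟩
      · rw [hhead]
        simp [splitC]
      -- goal: filter over the whole tail list = takeWhile over splitC r
      rw [hhead]
      have hA : splitC '\n' ('\n' :: (split2 r).headD []) = [] :: splitC '\n' ((split2 r).headD []) := by
        simp [splitC]
      have hB : splitC '\n' ('\n' :: r) = [] :: splitC '\n' r := by simp [splitC]
      rw [hA, hB]
      simp only [List.drop_succ_cons, List.drop_zero]
      cases r with
      | nil =>
        simp [split2, splitC]
      | cons d r' =>
        have hd : d ≠ '\n' := by
          intro hdn
          subst hdn
          simp [List.isPrefixOf] at hp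
        -- head of splitC of the block is d :: …, nonempty
        have hbd := split2_headD_cons d r' (by
          simp [List.isPrefixOf]
          exact fun h => absurd h.symm hd)
        obtain ⟨x, t, hx⟩ := List.exists_cons_of_ne_nil (splitC_ne_nil '\n' ((split2 r').headD []))
        obtain ⟨y, u, hy⟩ := List.exists_cons_of_ne_nil (splitC_ne_nil '\n' r')
        have hpx : splitC '\n' ((split2 (d :: r')).headD []) = (d :: x) :: t := by
          rw [hbd]
          simp only [splitC, hd, if_false, hx, List.modifyHead]
        have hpy : splitC '\n' (d :: r') = (d :: y) :: u := by
          simp [splitC, hd, hy, List.modifyHead]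
        obtain ⟨ih1, ih2⟩ := ih
        rw [hpx] at ih1 ⊢
        rw [hpy] at ih1 ⊢
        simp only [List.headD_cons, List.cons.injEq] at ih1
        rw [hpx] at ih2
        rw [hpy] at ih2
        simp only [List.drop_succ_cons, List.drop_zero] at ih2
        simp only [ne_eq, decide_not] at ih2 ⊢
        simp [ih1.2, ih2]
    · -- c ≠ '\n'
      obtain ⟨x, t, hx⟩ := List.exists_cons_of_ne_nil (splitC_ne_nil '\n' ((split2 r).headD []))
      obtain ⟨y, u, hy⟩ := List.exists_cons_of_ne_nil (splitC_ne_nil '\n' r)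
      have hpx : splitC '\n' ((split2 (c :: r)).headD []) = (c :: x) :: t := by
        rw [hhead]
        simp only [splitC, hc, if_false, hx, List.modifyHead]
      have hpy : splitC '\n' (c :: r) = (c :: y) :: u := by
        simp [splitC, hc, hy, List.modifyHead]
      obtain ⟨ih1, ih2⟩ := ih
      rw [hx, hy] at ih1
      simp only [List.headD_cons] at ih1
      rw [hx] at ih2
      rw [hy] at ih2
      constructor
      · rw [hpx, hpy]
        simp [ih1]
      · rw [hpx, hpy]
        simpa using ih2

theorem skipEmptyA_map (xs : List (List Char)) :
    skipEmptyA (xs.map String.ofList) = (skipE xs).map String.ofList := by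
  induction xs with
  | nil => simp [skipEmptyA, skipE]
  | cons x t ih =>
    by_cases hx : x = []
    · subst hx
      simpa [skipEmptyA, skipE] using ih
    · have : String.ofList x ≠ "" := by simpa using hx
      simp [skipEmptyA, skipE, hx, this]

theorem rowsA_map (xs : List (List Char)) :
    rowsA (xs.map String.ofList)
      = (xs.takeWhile (fun p => p ≠ [])).map (fun x => (splitC '\t' x).map String.ofList) := by
  induction xs with
  | nil => simp [rowsA]
  | cons x t ih =>
    by_cases hx : x = []
    · subst hx
      simp [rowsA]
    · have h1 : String.ofList x ≠ "" := by simpa using hx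
      have h2 : pySplitTab (String.ofList x) = (splitC '\t' x).map String.ofList := by
        simp [pySplitTab, splitOn_single]
      simp [rowsA, hx, h1, h2, ih]

theorem okEq (body : String) :
    (match skipEmptyA (pySplitNl body) with
     | [] => ((false : Bool), ("" : String), ([] : List String), ([] : List (List String)))
     | h :: rest => (false, "", pySplitTab h, rowsA rest))
    = (if pyLstripNl body = "" then ((false : Bool), ("" : String), ([] : List String), ([] : List (List String)))
       else
         (false, "",
          pySplitTab ((pySplitNl (((PySem.Chars.splitOnMax (pyLstripNl body).toList ['\n', '\n'] 1).map String.ofList).headD "")).headD ""),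
          (((pySplitNl (((PySem.Chars.splitOnMax (pyLstripNl body).toList ['\n', '\n'] 1).map String.ofList).headD "")).drop 1).filter (fun p => p ≠ "")).map (fun p => pySplitTab p))) := by
  have hsplit : pySplitNl body = (splitC '\n' body.toList).map String.ofList := by
    simp [pySplitNl, splitOn_single]
  by_cases hnil : body.toList.dropWhile (fun c => c == '\n') = []
  · have hstr : pyLstripNl body = "" := by simp [pyLstripNl, hnil]
    rw [hsplit, skipEmptyA_map, skipE_splitC, if_pos hnil, if_pos hstr]
    simp
  · have hform := skipE_splitC body.toList
    rw [if_neg hnil] at hform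
    have hstr : pyLstripNl body ≠ "" := by
      simp only [pyLstripNl]
      simpa using hnil
    have htl : (pyLstripNl body).toList = body.toList.dropWhile (fun c => c == '\n') := by
      simp [pyLstripNl]
    obtain ⟨h, t, hh⟩ := List.exists_cons_of_ne_nil
      (splitC_ne_nil '\n' (body.toList.dropWhile (fun c => c == '\n')))
    obtain ⟨b, bs, hb⟩ := List.exists_cons_of_ne_nil
      (split2_ne_nil (body.toList.dropWhile (fun c => c == '\n')))
    -- the block B extracts, at the char level
    have hblock : (((PySem.Chars.splitOnMax (pyLstripNl body).toList ['\n', '\n'] 1).map String.ofList).headD "")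
        = String.ofList b := by
      rw [htl, splitOnMax_two, hb]
      simp
    have hG := blockG (body.toList.dropWhile (fun c => c == '\n'))
    rw [hb, hh] at hG
    simp only [List.headD_cons, List.drop_succ_cons, List.drop_zero] at hG
    obtain ⟨p, ps, hp⟩ := List.exists_cons_of_ne_nil (splitC_ne_nil '\n' b)
    rw [hp] at hG
    simp only [List.headD_cons, List.drop_succ_cons, List.drop_zero] at hG
    -- left side: A's scan
    rw [hsplit, skipEmptyA_map, hform, hh]
    simp only [List.map_cons]
    -- right side: B's block split
    rw [if_neg hstr, hblock]
    have hparts : pySplitNl (String.ofList b) = (splitC '\n' b).map String.ofList := by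
      simp [pySplitNl, splitOn_single]
    rw [hparts, hp]
    simp only [List.map_cons, List.headD_cons, List.drop_succ_cons, List.drop_zero]
    -- headers agree
    have hhead : pySplitTab (String.ofList p) = pySplitTab (String.ofList h) := by
      rw [hG.1]
    -- rows agree
    have hfilter : (ps.map String.ofList).filter (fun q => q ≠ "")
        = (ps.filter (fun q => q ≠ [])).map String.ofList := by
      rw [List.filter_map]
      have : ((fun q => decide (q ≠ "")) ∘ String.ofList) = (fun (q : List Char) => decide (q ≠ [])) := by
        funext q
        simp
      rw [this]
    have hrows : rowsA (t.map String.ofList)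
        = (((ps.map String.ofList).filter (fun q => q ≠ "")).map (fun q => pySplitTab q)) := by
      rw [rowsA_map, hfilter, List.map_map, ← hG.2]
      congr 1
      funext q
      simp [pySplitTab, splitOn_single]
    rw [hrows, hhead]

-- ===== VERDICT (by name: the statement is the Claim_ definition above) =====
theorem parse_tcp_response_py_spec : Claim_equal_parse_tcp_response_py := by
  intro raw _
  show parse_tcp_response_py raw = parse_tcp_response_py_alt raw
  rw [parse_tcp_response_py, parse_tcp_response_py_alt]
  by_cases h1 : PySem.Str.startswith raw "ERR " = true
  · rw [if_pos h1, if_pos h1]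
  · rw [if_neg h1, if_neg h1]
    by_cases h2 : PySem.Str.startswith raw "PONG" = true
    · rw [if_pos h2, if_pos h2]
    · rw [if_neg h2, if_neg h2]
      by_cases h3 : PySem.Str.startswith raw "OK\n" = true
      · rw [if_pos h3, if_pos h3]
        exact okEq (PySem.Str.slice raw (some 3) none)
      · rw [if_neg h3, if_neg h3]
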